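-- pv_equiv track=rewrite | github.com/socathie/CodeFights | Arcade/WaterfallOfIntegration/gravitation.py | gravitation
-- ===== SOURCE A (Python) =====
-- def gravitation(rows):
--
--     minTimer = len(rows)
--     answer = []
--     for i in range(len(rows[0])):
--         finish = len(rows) - 1
--         timer = 0
--         for j in range(len(rows) - 1, -1, -1):
--             if rows[j][i] == '#':
--                 timer = finish - j
--                 finish -= 1
--         if timer == minTimer:
--             answer.append(i)
--         if timer < minTimer:
--             minTimer = timer
--             answer = [i]
--     return answer
-- ===== SOURCE B (Python) =====
-- def gravitation(rows):
--     n = len(rows)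
--     minTimer = n
--     answer = []
--     for i in range(len(rows[0])):
--         col = [row[i] for row in rows]
--         c = col.count('#')
--         timer = (n - c) - col.index('#') if c else 0
--         if timer == minTimer:
--             answer.append(i)
--         elif timer < minTimer:
--             minTimer = timer
--             answer = [i]
--     return answer
-- ===== Notes on version B (the rewrite author's own statement) =====
-- stated objective: simpler
-- what changed: A simulates the falling blocks per column bottom-up with a finish/timer state machine; B computes each column's timer directly by the closed form (n - count('#')) - index of topmost '#' (0 for empty columns), using count/index instead of the simulation.
import Mathlib
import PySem

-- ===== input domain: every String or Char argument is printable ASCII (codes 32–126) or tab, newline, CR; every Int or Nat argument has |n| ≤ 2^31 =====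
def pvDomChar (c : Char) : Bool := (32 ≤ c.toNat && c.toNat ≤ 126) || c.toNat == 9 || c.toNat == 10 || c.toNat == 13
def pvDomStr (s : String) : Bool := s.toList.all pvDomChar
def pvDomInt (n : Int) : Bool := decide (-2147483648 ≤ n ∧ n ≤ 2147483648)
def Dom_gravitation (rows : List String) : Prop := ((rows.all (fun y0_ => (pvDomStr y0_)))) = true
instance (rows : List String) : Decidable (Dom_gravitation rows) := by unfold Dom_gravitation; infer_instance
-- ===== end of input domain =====

-- B replaces A's per-column bottom-up finish/timer falling simulation by the closed form
-- timer = (n - count '#') - index of topmost '#' (0 for an all-empty column): simpler, same cost.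


-- ===== PORT A =====
def gravitation (rows : List String) : List Int :=
  let n : Int := (rows.length : Int)
  ((PySem.List.pyRange 0 (PySem.Str.len (PySem.List.pyGetD rows 0 "")) 1).foldl
    (fun (st : Int × List Int) i =>
      let inner := (PySem.List.pyRange (n - 1) (-1) (-1)).foldl
        (fun (fj : Int × Int) j =>
          if (PySem.Str.pyGet? (PySem.List.pyGetD rows j "") i).getD ' ' = '#'
          then (fj.1 - 1, fj.1 - j) else fj)
        (n - 1, 0)
      let timer := inner.2
      let st1 := if timer = st.1 then (st.1, st.2 ++ [i]) else st
      if timer < st.1 then (timer, [i]) else st1)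
    (n, [])).2

-- ===== PORT B =====
def gravitation_alt (rows : List String) : List Int :=
  let n : Int := (rows.length : Int)
  ((PySem.List.pyRange 0 (PySem.Str.len (PySem.List.pyGetD rows 0 "")) 1).foldl
    (fun (st : Int × List Int) i =>
      let col := rows.map (fun r => (PySem.Str.pyGet? r i).getD ' ')
      let c := col.count '#'
      let timer : Int := if c ≠ 0 then (n - (c : Int)) - (((PySem.List.index? col '#').getD 0 : Nat) : Int) else 0
      if timer = st.1 then (st.1, st.2 ++ [i])
      else if timer < st.1 then (timer, [i])
      else st)
    (n, [])).2

-- ===== PRECONDITION & SPEC =====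
-- Pre_ excludes exactly the inputs where Python A raises an IndexError: the empty list
-- (rows[0]) and grids where some row is shorter than the first row (rows[j][i]).
def Pre_gravitation (rows : List String) : Prop :=
  rows ≠ [] ∧ ∀ r ∈ rows, (rows.headD "").toList.length ≤ r.toList.length
instance (rows : List String) : Decidable (Pre_gravitation rows) := by unfold Pre_gravitation; infer_instance
def pvWitness_gravitation : List String := ["#.", ".#"]
def Spec_gravitation (rows : List String) (out : List Int) : Prop := out = gravitation_alt rows
instance (rows : List String) (out : List Int) : Decidable (Spec_gravitation rows out) := by unfold Spec_gravitation; infer_instance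

-- ===== CLAIM (what is proved, stated in full; the proofs are below) =====
def Claim_equal_gravitation : Prop := ∀ (rows : List String), Dom_gravitation rows → Pre_gravitation rows → Spec_gravitation rows (gravitation rows)

-- ===== LEMMAS AND PROOFS =====

-- Closed form of A's inner (bottom-up) loop, as a foldr over the suffix of the column from row a.

theorem inner_closed (col : List Char) (a : Nat) (h : a ≤ col.length) :
    (PySem.List.pyRange (a : Int) (col.length : Int) 1).foldr
      (fun j (fj : Int × Int) => if PySem.List.pyGetD col j ' ' = '#' then (fj.1 - 1, fj.1 - j) else fj)
      ((col.length : Int) - 1, 0)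
    = ((col.length : Int) - 1 - ((col.drop a).count '#' : Int),
       if (col.drop a).count '#' = 0 then 0
       else ((col.length : Int) - ((col.drop a).count '#' : Int))
            - ((a : Int) + (((PySem.List.index? (col.drop a) '#').getD 0 : Nat) : Int))) := by
  obtain ⟨k, hk⟩ : ∃ k, col.length - a = k := ⟨_, rfl⟩
  induction k generalizing a with
  | zero =>
    have ha : a = col.length := by omega
    subst ha
    rw [PySem.List.pyRange_one_eq_nil (by omega)]
    simp [List.drop_length]
  | succ k ih =>
    have ha : a < col.length := by omega
    rw [PySem.List.pyRange_one_cons (by exact_mod_cast ha)]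
    have hcast : ((a : Int) + 1) = ((a + 1 : Nat) : Int) := by push_cast; ring
    rw [List.foldr_cons, hcast, ih (a + 1) (by omega) (by omega)]
    have hget : PySem.List.pyGetD col (a : Int) ' ' = col[a] := by
      rw [PySem.List.pyGetD_natCast, List.getD_eq_getElem col ' ' ha]
    have hdrop : col.drop a = col[a] :: col.drop (a + 1) := (List.getElem_cons_drop ha).symm
    by_cases hc : col[a] = '#'
    · rw [hget, if_pos hc, hdrop, hc]
      rw [List.count_cons_self]
      rw [PySem.List.index?_cons_self]
      have : (List.count '#' (col.drop (a+1)) + 1) ≠ 0 := by omega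
      simp only [this, if_false, Option.getD_some, Prod.mk.injEq]
      refine ⟨by push_cast; ring, by push_cast; ring⟩
    · rw [hget, if_neg hc, hdrop]
      rw [List.count_cons_of_ne (by simpa using hc)]
      by_cases h0 : List.count '#' (col.drop (a+1)) = 0
      · simp [h0]
      · rw [PySem.List.index?_cons_of_ne _ hc]
        have hmem : '#' ∈ col.drop (a+1) := by
          rw [← List.count_pos_iff]; omega
        obtain ⟨m, hm⟩ := Option.isSome_iff_exists.mp ((PySem.List.index?_isSome_iff (col.drop (a+1)) '#').mpr hmem)
        rw [hm]
        simp only [Option.map_some, Option.getD_some, h0, if_false, Prod.mk.injEq]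
        refine ⟨trivial, by push_cast; ring⟩

-- A's inner fold equals B's closed-form column timer.
theorem timerA_eq (rows : List String) (i : Int) :
    ((PySem.List.pyRange ((rows.length : Int) - 1) (-1) (-1)).foldl
        (fun (fj : Int × Int) j =>
          if (PySem.Str.pyGet? (PySem.List.pyGetD rows j "") i).getD ' ' = '#'
          then (fj.1 - 1, fj.1 - j) else fj)
        ((rows.length : Int) - 1, 0)).2
    = (if (rows.map (fun r => (PySem.Str.pyGet? r i).getD ' ')).count '#' = 0 then 0
       else ((rows.length : Int) - ((rows.map (fun r => (PySem.Str.pyGet? r i).getD ' ')).count '#' : Int))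
            - (((PySem.List.index? (rows.map (fun r => (PySem.Str.pyGet? r i).getD ' ')) '#').getD 0 : Nat) : Int)) := by
  set col := rows.map (fun r => (PySem.Str.pyGet? r i).getD ' ') with hcol
  have hlen : col.length = rows.length := by simp [hcol]
  have hcong :
      (PySem.List.pyRange ((rows.length : Int) - 1) (-1) (-1)).foldl
        (fun (fj : Int × Int) j =>
          if (PySem.Str.pyGet? (PySem.List.pyGetD rows j "") i).getD ' ' = '#'
          then (fj.1 - 1, fj.1 - j) else fj)
        ((rows.length : Int) - 1, 0)
      = (PySem.List.pyRange ((rows.length : Int) - 1) (-1) (-1)).foldl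
        (fun (fj : Int × Int) j =>
          if PySem.List.pyGetD col j ' ' = '#'
          then (fj.1 - 1, fj.1 - j) else fj)
        ((rows.length : Int) - 1, 0) := by
    apply PySem.List.foldl_congr_mem
    intro acc j hj
    rw [PySem.List.mem_pyRange_neg_one] at hj
    have h0 : 0 ≤ j := by omega
    have h1 : j < (rows.length : Int) := by omega
    have h2 : j < (col.length : Int) := by omega
    rw [PySem.List.pyGetD_eq_getElem rows "" h0 h1,
        PySem.List.pyGetD_eq_getElem col ' ' h0 (by omega)]
    simp [hcol]
  rw [hcong, PySem.List.pyRange_neg_one_eq_reverse]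
  norm_num
  rw [← hlen]
  have hz : ((0 : Nat) : Int) = 0 := rfl
  have hmain := inner_closed col 0 (by omega)
  rw [hz] at hmain
  simp only [List.drop_zero] at hmain
  rw [hmain]
  simp

-- ===== VERDICT (by name: the statement is the Claim_ definition above) =====
theorem gravitation_spec : Claim_equal_gravitation := by
  intro rows _ _
  unfold Spec_gravitation gravitation gravitation_alt
  refine congrArg Prod.snd ?_
  apply PySem.List.foldl_congr_mem
  intro st i _
  dsimp only
  rw [timerA_eq rows i]
  simp only [ne_eq, ite_not]
  split_ifs <;> first | rfl | omega
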